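-- pv_equiv track=rewrite | github.com/atwade/EduRange | python/biomath.py | findLongestSeq
-- ===== SOURCE A (Python) =====
-- def findLongestSeq(rows):
--     data = rows[0]
--     output_data = []
--     for i in range(1,len(rows)):
--         col1 = rows[i][0]
--         if (col1 == data[0]):
--             len_data = len(data[1])
--             len_test = len(rows[i][1])
--             if(len_test > len_data):
--                 data = rows[i]
--         else:
--             output_data.append(data)
--             data = rows[i]
--     output_data.append(data)
--     return output_data
-- ===== SOURCE B (Python) =====
-- def findLongestSeq(rows):
--     output = []
--     i = 0
--     n = len(rows)
--     while i < n:
--         j = i + 1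
--         while j < n and rows[j][0] == rows[i][0]:
--             j += 1
--         group = rows[i:j]
--         best = group[0]
--         for r in group[1:]:
--             if len(r[1]) > len(best[1]):
--                 best = r
--         output.append(best)
--         i = j
--     return output
-- ===== Notes on version B (the rewrite author's own statement) =====
-- stated objective: alternative
-- what changed: B splits the rows into maximal consecutive runs with equal first column (two-pointer scan producing explicit group slices) and reduces each group to its first longest-second-field row, instead of A's single fold carrying a running-best row that is flushed when the first column changes.
import Mathlib
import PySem

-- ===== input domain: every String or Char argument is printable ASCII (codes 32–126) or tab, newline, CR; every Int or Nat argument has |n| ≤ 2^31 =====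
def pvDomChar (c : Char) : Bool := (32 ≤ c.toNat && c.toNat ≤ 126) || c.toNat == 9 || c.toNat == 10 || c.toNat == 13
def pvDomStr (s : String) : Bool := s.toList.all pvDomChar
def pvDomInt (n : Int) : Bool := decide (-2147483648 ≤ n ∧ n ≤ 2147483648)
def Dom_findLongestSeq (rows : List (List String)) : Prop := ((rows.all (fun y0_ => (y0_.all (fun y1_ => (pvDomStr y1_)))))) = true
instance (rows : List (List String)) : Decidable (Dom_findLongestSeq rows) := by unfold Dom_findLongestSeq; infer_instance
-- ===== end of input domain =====

-- B replaces A's running-best fold by a consecutive-group scan with a per-group maximum (idiomatic decomposition, same cost).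

-- ===== PORT A =====
-- literal transliteration of A: single pass carrying (data, output_data); the loop body
-- is the named helper aStep; out-of-range indexing (excluded by Pre_) is rendered with pyGetD defaults.
def aStep (st : List String × List (List String)) (row : List String) : List String × List (List String) :=
  let col1 := PySem.List.pyGetD row 0 ""
  if col1 == PySem.List.pyGetD st.1 0 "" then
    if PySem.Str.len (PySem.List.pyGetD row 1 "") > PySem.Str.len (PySem.List.pyGetD st.1 1 "") then
      (row, st.2)
    else
      (st.1, st.2)
  else
    (row, st.2 ++ [st.1])

def findLongestSeq (rows : List (List String)) : List (List String) :=
  match rows with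
  | [] => []   -- Python raises IndexError on rows[0]; excluded by Pre_
  | d0 :: rest =>
    let st := rest.foldl aStep (d0, ([] : List (List String)))
    st.2 ++ [st.1]

-- ===== PORT B =====
-- B's per-group reduction: best = group[0], replaced on strictly longer second field (first wins on ties)
def pyMaxByLen1 (h : List String) (t : List (List String)) : List String :=
  t.foldl (fun best r =>
    if PySem.Str.len (PySem.List.pyGetD r 1 "") > PySem.Str.len (PySem.List.pyGetD best 1 "") then r else best) h

-- B: split rows into maximal consecutive runs with equal first column, take the max of each run
def findLongestSeq_alt : List (List String) → List (List String)
  | [] => []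
  | r :: rs =>
    let p := fun (x : List String) => PySem.List.pyGetD x 0 "" == PySem.List.pyGetD r 0 ""
    pyMaxByLen1 r (rs.takeWhile p) :: findLongestSeq_alt (rs.dropWhile p)
termination_by rows => rows.length
decreasing_by
  simpa using Nat.lt_succ_of_le (List.length_dropWhile_le _ rs)

-- ===== PRECONDITION & SPEC =====
-- Pre_ is exactly where A returns normally: it excludes the empty list (A raises IndexError
-- on rows[0]) and, when there are at least two rows, any empty row (rows[i][0] / data[0]
-- raise) and any pair of adjacent rows with equal first column one of which has no second
-- field (len(rows[i][1]) / len(data[1]) raise).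
def Pre_findLongestSeq (rows : List (List String)) : Prop :=
  rows ≠ [] ∧ (rows.tail = [] ∨
    ((∀ r ∈ rows, r ≠ []) ∧
     ∀ p ∈ rows.zip rows.tail,
       PySem.List.pyGetD p.1 0 "" = PySem.List.pyGetD p.2 0 "" → 2 ≤ p.1.length ∧ 2 ≤ p.2.length))
instance (rows : List (List String)) : Decidable (Pre_findLongestSeq rows) := by
  unfold Pre_findLongestSeq; infer_instance
def pvWitness_findLongestSeq : List (List String) :=
  [["a", "x"], ["a", "xyz"], ["b", "q"]]

def Spec_findLongestSeq (rows : List (List String)) (out : List (List String)) : Prop := out = findLongestSeq_alt rows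
instance (rows : List (List String)) (out : List (List String)) : Decidable (Spec_findLongestSeq rows out) := by unfold Spec_findLongestSeq; infer_instance

-- ===== CLAIM (what is proved, stated in full; the proofs are below) =====
def Claim_equal_findLongestSeq : Prop := ∀ (rows : List (List String)), Dom_findLongestSeq rows → Pre_findLongestSeq rows → Spec_findLongestSeq rows (findLongestSeq rows)

-- ===== LEMMAS AND PROOFS =====

-- functional rendering of A's loop (proof helper): final output ++ [final data]
def aRun (data : List String) : List (List String) → List (List String)
  | [] => [data]
  | r :: rs =>
    if PySem.List.pyGetD r 0 "" == PySem.List.pyGetD data 0 "" then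
      aRun (if PySem.Str.len (PySem.List.pyGetD r 1 "") > PySem.Str.len (PySem.List.pyGetD data 1 "") then r else data) rs
    else
      data :: aRun r rs

theorem foldl_eq_aRun (rest : List (List String)) :
    ∀ (data : List String) (out : List (List String)),
    (rest.foldl aStep (data, out)).2 ++ [(rest.foldl aStep (data, out)).1] = out ++ aRun data rest := by
  induction rest with
  | nil => intro data out; simp [aRun]
  | cons r rs ih =>
    intro data out
    rw [List.foldl_cons, aRun, aStep]
    by_cases h : (PySem.List.pyGetD r 0 "" == PySem.List.pyGetD data 0 "") = true
    · rw [if_pos h, if_pos h]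
      by_cases h2 : PySem.Str.len (PySem.List.pyGetD r 1 "") > PySem.Str.len (PySem.List.pyGetD data 1 "")
      · rw [if_pos h2, if_pos h2]; exact ih r out
      · rw [if_neg h2, if_neg h2]; exact ih data out
    · rw [if_neg h, if_neg h, ih r (out ++ [data])]
      simp

theorem aRun_eq_alt (rest : List (List String)) :
    ∀ (data : List String), aRun data rest = findLongestSeq_alt (data :: rest) := by
  induction rest with
  | nil => intro data; simp [aRun, findLongestSeq_alt, pyMaxByLen1]
  | cons r rs ih =>
    intro data
    rw [aRun]
    by_cases h : (PySem.List.pyGetD r 0 "" == PySem.List.pyGetD data 0 "") = true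
    · have hk : PySem.List.pyGetD r 0 "" = PySem.List.pyGetD data 0 "" := by simpa using h
      rw [if_pos h]
      by_cases h2 : PySem.Str.len (PySem.List.pyGetD r 1 "") > PySem.Str.len (PySem.List.pyGetD data 1 "")
      · rw [if_pos h2, ih r]
        conv_lhs => rw [findLongestSeq_alt]
        conv_rhs => rw [findLongestSeq_alt]
        simp only [hk, List.takeWhile_cons, List.dropWhile_cons, pyMaxByLen1,
          List.foldl_cons, if_pos h2, beq_self_eq_true, if_true]
      · rw [if_neg h2, ih data]
        conv_lhs => rw [findLongestSeq_alt]
        conv_rhs => rw [findLongestSeq_alt]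
        simp only [hk, List.takeWhile_cons, List.dropWhile_cons, pyMaxByLen1,
          List.foldl_cons, if_neg h2, beq_self_eq_true, if_true]
    · rw [if_neg h, ih r]
      conv_rhs => rw [findLongestSeq_alt]
      simp only [List.takeWhile_cons, List.dropWhile_cons, h, Bool.false_eq_true,
        if_false, pyMaxByLen1, List.foldl_nil]

-- ===== VERDICT (by name: the statement is the Claim_ definition above) =====
theorem findLongestSeq_spec : Claim_equal_findLongestSeq := by
  intro rows _ hpre
  unfold Spec_findLongestSeq
  match rows with
  | [] => exact absurd rfl hpre.1
  | d0 :: rest =>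
    have h0 : findLongestSeq (d0 :: rest)
        = (rest.foldl aStep (d0, [])).2 ++ [(rest.foldl aStep (d0, [])).1] := rfl
    rw [h0, foldl_eq_aRun rest d0 [], List.nil_append, aRun_eq_alt]
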